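-- pv_equiv track=rewrite | github.com/jstabitunlikely/adventofcode | src/day02.py | solve_1
-- ===== SOURCE A (Python) =====
-- def sign(num):
--     if num < 0:
--         return -1
--     if num > 0:
--         return 1
--     return 0
--
-- def solve_1(reports):
--     safe = 0
--     for report in reports:
--         report_d = [y-x for x,y in zip(report, report[1:])]
--         if [d for d in report_d if abs(d) > 3]:
--             continue
--         if len(set([sign(d) for d in report_d])) > 1:
--             continue
--         safe += 1
--     return safe
-- ===== SOURCE B (Python) =====
-- def solve_1(reports):
--     safe = 0
--     for report in reports:
--         ok = True
--         target = None
--         for prev, cur in zip(report, report[1:]):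
--             d = cur - prev
--             s = (d > 0) - (d < 0)
--             if target is None:
--                 target = s
--             if abs(d) > 3 or s != target:
--                 ok = False
--                 break
--         if ok:
--             safe += 1
--     return safe
-- ===== Notes on version B (the rewrite author's own statement) =====
-- stated objective: alternative
-- what changed: Instead of materialising the diff list, a filtered violation list and a set of signs per report, B makes one fused pass over adjacent pairs with an early break, comparing each step's sign against the first step's sign.
import Mathlib
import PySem

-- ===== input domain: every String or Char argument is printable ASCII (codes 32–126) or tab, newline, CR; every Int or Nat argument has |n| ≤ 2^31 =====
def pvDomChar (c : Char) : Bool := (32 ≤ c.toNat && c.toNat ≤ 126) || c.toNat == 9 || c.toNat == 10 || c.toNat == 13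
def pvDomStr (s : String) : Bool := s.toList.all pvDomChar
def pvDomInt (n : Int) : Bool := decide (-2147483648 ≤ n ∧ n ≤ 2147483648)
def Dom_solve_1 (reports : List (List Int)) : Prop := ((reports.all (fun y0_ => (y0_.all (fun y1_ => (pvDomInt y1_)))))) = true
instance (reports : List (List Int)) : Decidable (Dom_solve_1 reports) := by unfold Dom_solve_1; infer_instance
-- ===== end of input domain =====

-- B replaces A's three intermediate lists (diffs, violation filter, sign set) by a single
-- fused pass over adjacent pairs with an early break, comparing each sign to the first sign.

-- ===== PORT A =====
def pySign (num : Int) : Int :=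
  if num < 0 then -1 else if num > 0 then 1 else 0

def solve_1 (reports : List (List Int)) : Int :=
  reports.foldl (fun safe report =>
    let report_d := (report.zip (report.drop 1)).map (fun p => p.2 - p.1)
    if (report_d.filter (fun d => |d| > 3)) ≠ [] then safe
    else if (PySem.Set.ofList (report_d.map pySign)).length > 1 then safe
    else safe + 1) 0

-- ===== PORT B =====
-- inner loop of B: target = sign seen at the first pair, early exit on any violation
def checkB : Option Int → List (Int × Int) → Bool
  | _, [] => true
  | target, (prev, cur) :: rest =>
    let d := cur - prev
    let s : Int := (if d > 0 then 1 else 0) - (if d < 0 then 1 else 0)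
    let t := target.getD s
    if |d| > 3 ∨ s ≠ t then false
    else checkB (some t) rest

def solve_1_alt (reports : List (List Int)) : Int :=
  reports.foldl (fun safe report =>
    if checkB none (report.zip (report.drop 1)) then safe + 1 else safe) 0

-- ===== PRECONDITION & SPEC =====
def Spec_solve_1 (reports : List (List Int)) (out : Int) : Prop := out = solve_1_alt reports
instance (reports : List (List Int)) (out : Int) : Decidable (Spec_solve_1 reports out) := by unfold Spec_solve_1; infer_instance

-- ===== CLAIM (what is proved, stated in full; the proofs are below) =====
def Claim_equal_solve_1 : Prop := ∀ (reports : List (List Int)), Dom_solve_1 reports → Spec_solve_1 reports (solve_1 reports)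

-- ===== LEMMAS AND PROOFS =====

theorem bSign_eq (d : Int) :
    ((if d > 0 then (1:Int) else 0) - (if d < 0 then 1 else 0)) = pySign d := by
  unfold pySign; split_ifs <;> omega

theorem checkB_some (t : Int) (ps : List (Int × Int)) :
    checkB (some t) ps = true ↔ ∀ p ∈ ps, |p.2 - p.1| ≤ 3 ∧ pySign (p.2 - p.1) = t := by
  induction ps with
  | nil => simp [checkB]
  | cons p rest ih =>
    obtain ⟨x, y⟩ := p
    simp only [checkB, Option.getD, bSign_eq]
    by_cases h : |y - x| > 3 ∨ pySign (y - x) ≠ t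
    · simp only [if_pos h]
      constructor
      · intro hf; exact absurd hf (by simp)
      · intro hall
        have := hall (x, y) (by simp)
        simp at this
        rcases h with h | h
        · omega
        · exact absurd this.2 h
    · simp only [if_neg h, ih]
      push_neg at h
      constructor
      · intro hr q hq
        rcases List.mem_cons.mp hq with rfl | hq
        · exact ⟨h.1, h.2⟩
        · exact hr q hq
      · intro hall q hq; exact hall q (List.mem_cons_of_mem _ hq)

theorem nodup_all_eq_len_le_one {l : List Int} (hn : l.Nodup)
    (h : ∀ a ∈ l, ∀ b ∈ l, a = b) : l.length ≤ 1 := by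
  cases l with
  | nil => simp
  | cons x xs =>
    cases xs with
    | nil => simp
    | cons y ys =>
      have hxy : x = y := h x (by simp) y (by simp)
      simp [hxy] at hn

theorem setlen_le_one_iff (l : List Int) :
    (PySem.Set.ofList l).length ≤ 1 ↔ ∀ a ∈ l, ∀ b ∈ l, a = b := by
  constructor
  · intro h a ha b hb
    have ha' : a ∈ PySem.Set.ofList l := (PySem.Set.mem_ofList l a).mpr ha
    have hb' : b ∈ PySem.Set.ofList l := (PySem.Set.mem_ofList l b).mpr hb
    match hS : PySem.Set.ofList l with
    | [] => rw [hS] at ha'; simp at ha'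
    | [x] =>
      rw [hS] at ha' hb'; simp at ha' hb'; rw [ha', hb']
    | x :: y :: t => rw [hS] at h; simp at h
  · intro h
    exact nodup_all_eq_len_le_one (PySem.Set.nodup_ofList l)
      (fun a ha b hb => h a ((PySem.Set.mem_ofList l a).mp ha) b ((PySem.Set.mem_ofList l b).mp hb))

theorem checkB_none_iff (ps : List (Int × Int)) :
    checkB none ps = true ↔
      ((ps.map (fun p => p.2 - p.1)).filter (fun d => |d| > 3) = [] ∧
       (PySem.Set.ofList ((ps.map (fun p => p.2 - p.1)).map pySign)).length ≤ 1) := by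
  cases ps with
  | nil => simp [checkB, PySem.Set.ofList]
  | cons p rest =>
    obtain ⟨x, y⟩ := p
    simp only [checkB, Option.getD, bSign_eq]
    by_cases hd : |y - x| > 3
    · have : (|y - x| > 3 ∨ pySign (y - x) ≠ pySign (y - x)) := Or.inl hd
      simp only [if_pos this]
      constructor
      · intro hf; exact absurd hf (by simp)
      · rintro ⟨hfil, -⟩
        have : (y - x) ∈ ((⟨x,y⟩ :: rest : List (Int × Int)).map (fun p => p.2 - p.1)).filter (fun d => |d| > 3) := by
          simp [hd]
        rw [hfil] at this; simp at this
    · have hcond : ¬ (|y - x| > 3 ∨ pySign (y - x) ≠ pySign (y - x)) := by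
        push_neg; exact ⟨by omega, rfl⟩
      simp only [if_neg hcond, checkB_some, setlen_le_one_iff]
      rw [List.filter_eq_nil_iff]
      constructor
      · intro hall
        refine ⟨?_, ?_⟩
        · intro d hdmem
          simp only [List.mem_map, List.mem_cons] at hdmem
          obtain ⟨q, hq | hq, rfl⟩ := hdmem
          · subst hq; simpa using hd
          · have := (hall q hq).1; simpa using this
        · intro a ha b hb
          simp only [List.map_map, List.mem_map, List.mem_cons] at ha hb
          obtain ⟨q, hq | hq, rfl⟩ := ha <;> obtain ⟨r, hr | hr, rfl⟩ := hb <;>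
            simp only [Function.comp_apply]
          · subst hq; subst hr; rfl
          · subst hq; exact ((hall r hr).2).symm
          · subst hr; exact (hall q hq).2
          · rw [(hall q hq).2, (hall r hr).2]
      · rintro ⟨hfil, hsig⟩ q hq
        refine ⟨?_, ?_⟩
        · have := hfil (q.2 - q.1) (by simp only [List.mem_map]; exact ⟨q, List.mem_cons_of_mem _ hq, rfl⟩)
          simpa using this
        · refine hsig (pySign (q.2 - q.1)) ?_ (pySign (y - x)) ?_
          · simp only [List.map_map, List.mem_map]
            exact ⟨q, List.mem_cons_of_mem _ hq, rfl⟩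
          · simp only [List.map_map, List.mem_map]
            exact ⟨(x, y), List.mem_cons_self, rfl⟩

theorem step_eq (safe : Int) (report : List Int) :
    (if (((report.zip (report.drop 1)).map (fun p => p.2 - p.1)).filter (fun d => |d| > 3)) ≠ [] then safe
     else if (PySem.Set.ofList (((report.zip (report.drop 1)).map (fun p => p.2 - p.1)).map pySign)).length > 1 then safe
     else safe + 1) =
    (if checkB none (report.zip (report.drop 1)) then safe + 1 else safe) := by
  have h := checkB_none_iff (report.zip (report.drop 1))
  by_cases hc : checkB none (report.zip (report.drop 1)) = true
  · obtain ⟨h1, h2⟩ := h.mp hc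
    rw [if_pos hc, if_neg (not_not_intro h1), if_neg (by omega)]
  · rw [if_neg hc]
    rw [h] at hc
    by_cases h1 : ((report.zip (report.drop 1)).map (fun p => p.2 - p.1)).filter (fun d => |d| > 3) = []
    · have h2 : ¬ (PySem.Set.ofList (((report.zip (report.drop 1)).map (fun p => p.2 - p.1)).map pySign)).length ≤ 1 :=
        fun hle => hc ⟨h1, hle⟩
      rw [if_neg (not_not_intro h1), if_pos (by omega)]
    · rw [if_pos h1]

-- ===== VERDICT (by name: the statement is the Claim_ definition above) =====
theorem solve_1_spec : Claim_equal_solve_1 := by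
  intro reports _
  unfold Spec_solve_1 solve_1 solve_1_alt
  congr 1
  funext safe report
  exact step_eq safe report
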